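-- pv_equiv track=rewrite | github.com/tom-kerr/rest_easy | rest_easy/core/composer.py | inherit_parent_syntax
-- ===== SOURCE A (Python) =====
-- def inherit_parent_syntax(syntax, parent_syntax):
--     for c in ('+bind', '+chain', '+multi', '+args'):
--         if c not in syntax and c in parent_syntax:
--             syntax[c] = parent_syntax[c]
--         elif c in syntax and c in parent_syntax:
--             if c == '+chain' and parent_syntax[c] != '&':
--                 syntax[c] = parent_syntax[c]
--             elif c == '+bind' and parent_syntax[c] != '=':
--                 syntax[c] = parent_syntax[c]
--             elif c in ('+multi', '+args'):
--                 syntax[c] = parent_syntax[c]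
--     return syntax
-- ===== SOURCE B (Python) =====
-- # Rebuild instead of mutate: one pass over syntax's own entries computes each final value,
-- # then the flags that are new come appended; A mutates `syntax` in place, B builds a fresh dict
-- # (return values agree; the in-place side effect of A is not reproduced).
--
-- _FLAGS = ('+bind', '+chain', '+multi', '+args')
--
-- def _merged(key, val, parent_syntax):
--     """Final value of an entry the child already has."""
--     if key in _FLAGS and key in parent_syntax:
--         pv = parent_syntax[key]
--         if not (key == '+chain' and pv == '&') and not (key == '+bind' and pv == '='):
--             return pv
--     return val
--
-- def inherit_parent_syntax(syntax, parent_syntax):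
--     return dict(
--         [(k, _merged(k, v, parent_syntax)) for k, v in syntax.items()]
--         + [(c, parent_syntax[c]) for c in _FLAGS
--            if c in parent_syntax and c not in syntax]
--     )
-- ===== Notes on version B (the rewrite author's own statement) =====
-- stated objective: alternative
-- what changed: A mutates the child dict in place via a conditional cascade over the four flag keys; B never mutates: it rebuilds the result functionally in one pass over the child's own entries (computing each entry's final value) and appends the flag keys the child lacks; Pre_ excludes association lists with duplicate keys, which do not encode any Python dict (B's dict(...) would collapse them). Return values agree; A's in-place side effect on `syntax` is not reproduced.
import Mathlib
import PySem

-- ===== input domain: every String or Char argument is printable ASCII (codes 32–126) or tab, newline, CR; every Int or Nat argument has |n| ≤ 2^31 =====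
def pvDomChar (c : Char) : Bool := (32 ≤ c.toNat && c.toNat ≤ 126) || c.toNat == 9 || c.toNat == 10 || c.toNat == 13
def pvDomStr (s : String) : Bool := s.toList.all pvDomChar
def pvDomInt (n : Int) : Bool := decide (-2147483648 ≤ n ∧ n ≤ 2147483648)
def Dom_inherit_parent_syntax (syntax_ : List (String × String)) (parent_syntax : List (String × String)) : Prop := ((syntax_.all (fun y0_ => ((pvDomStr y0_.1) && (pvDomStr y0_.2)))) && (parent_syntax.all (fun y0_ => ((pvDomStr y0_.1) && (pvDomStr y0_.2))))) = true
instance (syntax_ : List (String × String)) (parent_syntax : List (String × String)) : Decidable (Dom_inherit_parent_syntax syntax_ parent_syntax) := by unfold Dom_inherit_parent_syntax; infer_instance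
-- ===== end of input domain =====

-- B rebuilds the merged dict functionally (one pass over the child's entries, then the fresh flag
-- keys appended) instead of A's in-place conditional cascade; the equivalence is about the RETURN
-- value only (A mutates `syntax` in place, B builds a fresh dict).

-- ===== PORT A =====
-- one iteration of A's for-loop body, for key c
def pvStepA (p : PySem.Dict String String) (d : PySem.Dict String String) (c : String) : PySem.Dict String String :=
  if d.contains c = false ∧ p.contains c = true then
    d.insert c (p.getD c "")
  else if d.contains c = true ∧ p.contains c = true then
    if c == "+chain" ∧ p.getD c "" ≠ "&" then d.insert c (p.getD c "")
    else if c == "+bind" ∧ p.getD c "" ≠ "=" then d.insert c (p.getD c "")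
    else if c == "+multi" ∨ c == "+args" then d.insert c (p.getD c "")
    else d
  else d

def inherit_parent_syntax (syntax_ : List (String × String)) (parent_syntax : List (String × String)) : List (String × String) :=
  (["+bind", "+chain", "+multi", "+args"].foldl
    (pvStepA (PySem.Dict.mk parent_syntax)) (PySem.Dict.mk syntax_)).items

-- ===== PORT B =====
-- the tuple _FLAGS
def pvFlags : List String := ["+bind", "+chain", "+multi", "+args"]

-- _merged(key, val, parent_syntax): final value of an entry the child already has
def pvMerged (key : String) (val : String) (parent : PySem.Dict String String) : String :=
  if pvFlags.contains key && parent.contains key then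
    let pv := parent.getD key ""
    if !(key == "+chain" && pv == "&") && !(key == "+bind" && pv == "=") then pv else val
  else val

def inherit_parent_syntax_alt (syntax_ : List (String × String)) (parent_syntax : List (String × String)) : List (String × String) :=
  let s := PySem.Dict.mk syntax_
  let p := PySem.Dict.mk parent_syntax
  (PySem.Dict.ofList
    (s.items.map (fun kv => (kv.1, pvMerged kv.1 kv.2 p)) ++
     (pvFlags.filter (fun c => p.contains c && !(s.contains c))).map (fun c => (c, p.getD c "")))).items

-- ===== PRECONDITION & SPEC =====
-- Pre_ excludes association lists whose keys repeat: they do not encode any Python dict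
-- (dict arguments always have unique keys; B's dict(...) would collapse the repeats).
def Pre_inherit_parent_syntax (syntax_ : List (String × String)) (parent_syntax : List (String × String)) : Prop :=
  (syntax_.map Prod.fst).Nodup ∧ (parent_syntax.map Prod.fst).Nodup
instance (syntax_ : List (String × String)) (parent_syntax : List (String × String)) : Decidable (Pre_inherit_parent_syntax syntax_ parent_syntax) := by unfold Pre_inherit_parent_syntax; infer_instance

def pvWitness_inherit_parent_syntax : (List (String × String)) × (List (String × String)) :=
  ([("+chain", "&"), ("k", "v")], [("+chain", "x"), ("+bind", "=")])

def Spec_inherit_parent_syntax (syntax_ : List (String × String)) (parent_syntax : List (String × String)) (out : List (String × String)) : Prop := out = inherit_parent_syntax_alt syntax_ parent_syntax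
instance (syntax_ : List (String × String)) (parent_syntax : List (String × String)) (out : List (String × String)) : Decidable (Spec_inherit_parent_syntax syntax_ parent_syntax out) := by unfold Spec_inherit_parent_syntax; infer_instance

-- ===== CLAIM (what is proved, stated in full; the proofs are below) =====
def Claim_equal_inherit_parent_syntax : Prop := ∀ (syntax_ : List (String × String)) (parent_syntax : List (String × String)), Dom_inherit_parent_syntax syntax_ parent_syntax → Pre_inherit_parent_syntax syntax_ parent_syntax → Spec_inherit_parent_syntax syntax_ parent_syntax (inherit_parent_syntax syntax_ parent_syntax)

-- ===== LEMMAS AND PROOFS =====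

-- whether A's loop body writes key c (relative to the original child dict s)
def pvIns (s p : PySem.Dict String String) (c : String) : Bool :=
  p.contains c && !(s.contains c && ((c == "+chain" && p.getD c "" == "&") || (c == "+bind" && p.getD c "" == "=")))

-- the per-entry replacement after the keys in M have been processed
def pvF (p : PySem.Dict String String) (M : List String) (kv : String × String) : String × String :=
  if kv.1 ∈ M then (kv.1, pvMerged kv.1 kv.2 p) else kv

-- the fresh pairs appended after the keys in M have been processed
def pvFresh (s p : PySem.Dict String String) (M : List String) : List (String × String) :=
  (M.filter (fun c => p.contains c && !(s.contains c))).map (fun c => (c, p.getD c ""))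

theorem pvF_fst (p : PySem.Dict String String) (M : List String) (kv : String × String) :
    (pvF p M kv).1 = kv.1 := by
  unfold pvF; split <;> rfl

theorem contains_mk_iff (l : List (String × String)) (c : String) :
    (PySem.Dict.mk l).contains c = true ↔ c ∈ l.map Prod.fst := by
  rw [PySem.Dict.contains]
  simp only [List.any_eq_true, List.mem_map, beq_iff_eq]

theorem mem_fresh_key (s p : PySem.Dict String String) (M : List String)
    (kv : String × String) (h : kv ∈ pvFresh s p M) : kv.1 ∈ M := by
  unfold pvFresh at h
  rcases List.mem_map.mp h with ⟨c, hc, rfl⟩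
  exact List.mem_of_mem_filter hc

theorem contains_inv (syntax_ : List (String × String)) (p : PySem.Dict String String)
    (M : List String) (d : PySem.Dict String String) (c : String) (hcM : c ∉ M)
    (h : d.items = syntax_.map (pvF p M) ++ pvFresh (PySem.Dict.mk syntax_) p M) :
    d.contains c = (PySem.Dict.mk syntax_).contains c := by
  rw [PySem.Dict.contains, PySem.Dict.contains, h]
  simp only [List.any_append, List.any_map]
  have h2 : (pvFresh (PySem.Dict.mk syntax_) p M).any (fun q => q.1 == c) = false := by
    simp only [List.any_eq_false]
    intro q hq
    have := mem_fresh_key _ _ _ _ hq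
    simp only [beq_iff_eq]
    intro he; exact hcM (he ▸ this)
  have h1 : (syntax_.any ((fun q => q.1 == c) ∘ pvF p M)) = syntax_.any (fun q => q.1 == c) := by
    exact List.any_congr rfl (fun kv => by simp [Function.comp, pvF_fst])
  rw [h1, h2]
  simp

theorem pvStepA_char (s p d : PySem.Dict String String) (c : String)
    (hcc : c ∈ pvFlags)
    (hc : d.contains c = s.contains c) :
    pvStepA p d c = if pvIns s p c then d.insert c (p.getD c "") else d := by
  unfold pvStepA pvIns
  rw [hc]
  by_cases h1 : c = "+chain"
  · subst h1
    cases hs : s.contains "+chain" <;> cases hp : p.contains "+chain" <;>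
      by_cases hb : p.getD "+chain" "" = "&" <;> simp_all
  by_cases h2 : c = "+bind"
  · subst h2
    cases hs : s.contains "+bind" <;> cases hp : p.contains "+bind" <;>
      by_cases hb : p.getD "+bind" "" = "=" <;> simp_all
  have h34 : c = "+multi" ∨ c = "+args" := by
    simp [pvFlags] at hcc; tauto
  cases hs : s.contains c <;> cases hp : p.contains c <;> simp_all

theorem pvStep_inv (syntax_ : List (String × String)) (p : PySem.Dict String String)
    (M : List String) (d : PySem.Dict String String) (c : String)
    (hmem : c ∈ pvFlags) (hcM : c ∉ M)
    (h : d.items = syntax_.map (pvF p M) ++ pvFresh (PySem.Dict.mk syntax_) p M) :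
    (pvStepA p d c).items
      = syntax_.map (pvF p (M ++ [c])) ++ pvFresh (PySem.Dict.mk syntax_) p (M ++ [c]) := by
  have hc := contains_inv syntax_ p M d c hcM h
  rw [pvStepA_char (PySem.Dict.mk syntax_) p d c hmem hc]
  by_cases hins : pvIns (PySem.Dict.mk syntax_) p c = true
  · rw [if_pos hins]
    have hpcon : p.contains c = true := by
      unfold pvIns at hins
      simp only [Bool.and_eq_true] at hins
      exact hins.1
    cases hscon : (PySem.Dict.mk syntax_).contains c
    · -- fresh key: append
      rw [PySem.Dict.items_insert_of_not_contains _ _ (hc.trans hscon)]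
      have hnotin : c ∉ syntax_.map Prod.fst := by
        intro hcm
        rw [(contains_mk_iff syntax_ c).mpr hcm] at hscon
        cases hscon
      have hfres : pvFresh (PySem.Dict.mk syntax_) p (M ++ [c])
          = pvFresh (PySem.Dict.mk syntax_) p M ++ [(c, p.getD c "")] := by
        unfold pvFresh; rw [List.filter_append]
        simp [hpcon]
        exact fun a b hab he => hnotin (by subst he; exact List.mem_map_of_mem hab)
      have hmap : syntax_.map (pvF p (M ++ [c])) = syntax_.map (pvF p M) := by
        apply List.map_congr_left; intro kv hkv
        have hne : kv.1 ≠ c := fun he => hnotin (he ▸ List.mem_map_of_mem hkv)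
        unfold pvF
        simp [hne]
      rw [h, hfres, hmap, List.append_assoc]
    · -- existing key: in-place overwrite
      rw [PySem.Dict.items_insert_of_contains _ _ (hc.trans hscon)]
      rw [h, List.map_append]
      have hex : ∃ x, (c, x) ∈ syntax_ := by
        have hmm := (contains_mk_iff syntax_ c).mp hscon
        rcases List.mem_map.mp hmm with ⟨q, hq, rfl⟩
        exact ⟨q.2, hq⟩
      have hblock : ¬(c = "+chain" ∧ p.getD c "" = "&") ∧ ¬(c = "+bind" ∧ p.getD c "" = "=") := by
        unfold pvIns at hins
        simp [hpcon, hscon] at hins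
        constructor
        · rintro ⟨rfl, hv⟩; exact absurd hv (by simpa using hins.1)
        · rintro ⟨rfl, hv⟩; exact absurd hv (by simpa using hins.2)
      have hmerged : ∀ v, pvMerged c v p = p.getD c "" := by
        intro v
        by_cases h1 : c = "+chain"
        · subst h1
          have hv : p.getD "+chain" "" ≠ "&" := fun hv => hblock.1 ⟨rfl, hv⟩
          simp [pvMerged, pvFlags, hpcon, hv]
        by_cases h2 : c = "+bind"
        · subst h2
          have hv : p.getD "+bind" "" ≠ "=" := fun hv => hblock.2 ⟨rfl, hv⟩
          simp [pvMerged, pvFlags, hpcon, hv]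
        · simp [pvMerged, hmem, hpcon, h1, h2]
      have hfres : pvFresh (PySem.Dict.mk syntax_) p (M ++ [c])
          = pvFresh (PySem.Dict.mk syntax_) p M := by
        unfold pvFresh; rw [List.filter_append]
        simp
        exact fun _ => hex
      have hfr2 : (pvFresh (PySem.Dict.mk syntax_) p M).map
          (fun q => if (q.1 == c) = true then (c, p.getD c "") else q)
          = pvFresh (PySem.Dict.mk syntax_) p M := by
        conv_rhs => rw [← List.map_id (pvFresh (PySem.Dict.mk syntax_) p M)]
        apply List.map_congr_left; intro q hq
        have hqM := mem_fresh_key _ _ _ _ hq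
        have hne : q.1 ≠ c := fun he => hcM (he ▸ hqM)
        simp [hne]
      have hmap : (syntax_.map (pvF p M)).map
          (fun q => if (q.1 == c) = true then (c, p.getD c "") else q)
          = syntax_.map (pvF p (M ++ [c])) := by
        rw [List.map_map]
        apply List.map_congr_left; intro kv _
        simp only [Function.comp]
        obtain ⟨k, v⟩ := kv
        by_cases hk : k = c
        · subst hk
          simp [pvF, hcM, hmerged v]
        · by_cases hMk : k ∈ M
          · have h2 : k ∈ M ++ [c] := List.mem_append_left _ hMk
            simp [pvF, hMk, h2, hk]
          · have h2 : k ∉ M ++ [c] := by simp [hMk, hk]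
            simp [pvF, hMk, h2, hk]
      rw [hfr2, hmap, hfres]
  · rw [if_neg hins]
    rw [h]
    have hword : p.contains c = false ∨
        ((PySem.Dict.mk syntax_).contains c = true ∧
         ((c == "+chain" && p.getD c "" == "&") || (c == "+bind" && p.getD c "" == "=")) = true) := by
      by_cases h1 : p.contains c = true
      · right
        have hX : ((PySem.Dict.mk syntax_).contains c &&
            ((c == "+chain" && p.getD c "" == "&") || (c == "+bind" && p.getD c "" == "="))) = true := by
          cases hXc : ((PySem.Dict.mk syntax_).contains c &&
              ((c == "+chain" && p.getD c "" == "&") || (c == "+bind" && p.getD c "" == "=")))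
          · exfalso; apply hins; unfold pvIns; rw [h1, hXc]; rfl
          · rfl
        simp only [Bool.and_eq_true] at hX
        exact ⟨hX.1, hX.2⟩
      · left; simpa using h1
    have hfres : pvFresh (PySem.Dict.mk syntax_) p (M ++ [c])
        = pvFresh (PySem.Dict.mk syntax_) p M := by
      unfold pvFresh; rw [List.filter_append]
      rcases hword with h1 | ⟨h1, _⟩
      · simp [h1]
      · have hex2 : ∃ x, (c, x) ∈ syntax_ := by
          have hmm := (contains_mk_iff syntax_ c).mp h1
          rcases List.mem_map.mp hmm with ⟨q, hq, rfl⟩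
          exact ⟨q.2, hq⟩
        simp
        exact fun _ => hex2
    have hmerge0 : ∀ v, pvMerged c v p = v := by
      intro v
      unfold pvMerged
      rcases hword with h1 | ⟨_, h1⟩
      · simp [h1]
      · simp only [Bool.or_eq_true, Bool.and_eq_true, beq_iff_eq] at h1
        rcases h1 with ⟨rfl, h3⟩ | ⟨rfl, h3⟩ <;> simp [h3]
    have hmap : syntax_.map (pvF p (M ++ [c])) = syntax_.map (pvF p M) := by
      apply List.map_congr_left; intro kv _
      by_cases hk : kv.1 = c
      · subst hk
        simp [pvF, hcM, hmerge0 kv.2]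
      · have h2 : (kv.1 ∈ M ++ [c]) ↔ (kv.1 ∈ M) := by simp [hk]
        simp only [pvF, h2]
    rw [hfres, hmap]

theorem pvInv (syntax_ : List (String × String)) (p : PySem.Dict String String)
    (ks : List String) :
    ∀ (M : List String) (d : PySem.Dict String String),
    (M ++ ks).Nodup → (∀ c ∈ ks, c ∈ pvFlags) →
    d.items = syntax_.map (pvF p M) ++ pvFresh (PySem.Dict.mk syntax_) p M →
    (ks.foldl (pvStepA p) d).items
      = syntax_.map (pvF p (M ++ ks)) ++ pvFresh (PySem.Dict.mk syntax_) p (M ++ ks) := by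
  induction ks with
  | nil => intro M d _ _ h; simpa using h
  | cons c rest ih =>
    intro M d hnd hfl h
    have hcM : c ∉ M := by
      rw [List.nodup_append] at hnd
      intro hmm
      exact hnd.2.2 c hmm c (by simp) rfl
    have hstep := pvStep_inv syntax_ p M d c (hfl c (by simp)) hcM h
    have hnd' : ((M ++ [c]) ++ rest).Nodup := by
      simpa [List.append_assoc] using hnd
    have := ih (M ++ [c]) (pvStepA p d c) hnd' (fun x hx => hfl x (by simp [hx])) hstep
    simpa [List.append_assoc] using this

theorem update_items_of_nodup (l : List (String × String)) :
    ∀ (d : PySem.Dict String String), ((d.items ++ l).map Prod.fst).Nodup →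
    (d.update l).items = d.items ++ l := by
  induction l with
  | nil => intro d _; simp [PySem.Dict.update]
  | cons kv rest ih =>
    intro d h
    have hnc : d.contains kv.1 = false := by
      rw [PySem.Dict.contains]
      simp only [List.map_append, List.map_cons] at h
      rcases List.nodup_append.mp h with ⟨_, _, hdisj⟩
      simp only [List.any_eq_false]
      intro q hq
      have hne : q.1 ≠ kv.1 := by
        intro he
        exact hdisj q.1 (List.mem_map_of_mem hq) kv.1 (by simp) he
      simpa using hne
    have hu : (d.update (kv :: rest)) = (d.insert kv.1 kv.2).update rest := by
      simp [PySem.Dict.update]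
    rw [hu]
    have hins := PySem.Dict.items_insert_of_not_contains d kv.2 hnc
    have h' : (((d.insert kv.1 kv.2).items ++ rest).map Prod.fst).Nodup := by
      rw [hins]; simpa using h
    rw [ih _ h', hins]
    simp

theorem ofList_items_of_nodup (l : List (String × String)) (h : (l.map Prod.fst).Nodup) :
    (PySem.Dict.ofList l).items = l := by
  have := update_items_of_nodup l PySem.Dict.empty (by simpa [PySem.Dict.empty] using h)
  simpa [PySem.Dict.ofList, PySem.Dict.empty] using this

-- ===== VERDICT (by name: the statement is the Claim_ definition above) =====
theorem inherit_parent_syntax_spec : Claim_equal_inherit_parent_syntax := by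
  intro syntax_ parent_syntax _ hpre
  show inherit_parent_syntax syntax_ parent_syntax = inherit_parent_syntax_alt syntax_ parent_syntax
  unfold inherit_parent_syntax inherit_parent_syntax_alt
  simp only []
  have hbase : (PySem.Dict.mk syntax_).items
      = syntax_.map (pvF (PySem.Dict.mk parent_syntax) [])
        ++ pvFresh (PySem.Dict.mk syntax_) (PySem.Dict.mk parent_syntax) [] := by
    have hmapid : syntax_.map (pvF (PySem.Dict.mk parent_syntax) []) = syntax_ := by
      conv_rhs => rw [← List.map_id syntax_]
      apply List.map_congr_left; intro kv _; simp [pvF]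
    simp [pvFresh, hmapid]
  have hA := pvInv syntax_ (PySem.Dict.mk parent_syntax) pvFlags [] (PySem.Dict.mk syntax_)
      (by simp [pvFlags]) (fun c hc => hc) hbase
  simp only [List.nil_append] at hA
  have hkeysB : ((syntax_.map (fun kv => (kv.1, pvMerged kv.1 kv.2 (PySem.Dict.mk parent_syntax))) ++
      (pvFlags.filter (fun c => (PySem.Dict.mk parent_syntax).contains c &&
        !((PySem.Dict.mk syntax_).contains c))).map
          (fun c => (c, (PySem.Dict.mk parent_syntax).getD c ""))).map Prod.fst).Nodup := by
    rw [List.map_append, List.map_map, List.map_map]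
    have e1 : syntax_.map (Prod.fst ∘ fun kv => (kv.1, pvMerged kv.1 kv.2 (PySem.Dict.mk parent_syntax)))
        = syntax_.map Prod.fst := by
      apply List.map_congr_left; intro kv _; rfl
    have e2 : (pvFlags.filter (fun c => (PySem.Dict.mk parent_syntax).contains c &&
        !((PySem.Dict.mk syntax_).contains c))).map
          (Prod.fst ∘ fun c => (c, (PySem.Dict.mk parent_syntax).getD c ""))
        = pvFlags.filter (fun c => (PySem.Dict.mk parent_syntax).contains c &&
        !((PySem.Dict.mk syntax_).contains c)) := by
      conv_rhs => rw [← List.map_id (pvFlags.filter _)]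
      apply List.map_congr_left; intro c _; rfl
    rw [e1, e2]
    apply List.Nodup.append hpre.1
    · exact List.Nodup.filter _ (by decide)
    · intro a ha hb
      rcases List.mem_filter.mp hb with ⟨_, hcond⟩
      simp only [Bool.and_eq_true, Bool.not_eq_true'] at hcond
      rw [(contains_mk_iff syntax_ a).mpr ha] at hcond
      simp at hcond
  rw [ofList_items_of_nodup _ hkeysB]
  rw [show (["+bind", "+chain", "+multi", "+args"] : List String) = pvFlags from rfl, hA]
  unfold pvFresh
  congr 1
  apply List.map_congr_left; intro kv _
  by_cases hk : kv.1 ∈ pvFlags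
  · simp [pvF, hk]
  · have hcf : pvFlags.contains kv.1 = false := by simpa using hk
    simp [pvF, pvMerged, hk]
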